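-- pv_equiv track=rewrite | github.com/DaltonSayer/TwinSnake_AI | Models/pathBuilding/ShortCut_Cycle.py | path_dist
-- ===== SOURCE A (Python) =====
-- def path_dist(path, point1, point2, dir):
--     #distance in path from point1 to point2
--
--     if(dir == 1 and point2 > point1):#[point1 -> point2]
--         return point2-point1
--     if(dir == 1 and point1 > point2):#[-> point2 -> point1]
--         return len(path) - point1 + point2
--     if(point2 == point1):
--         return len(path)
--     return path_dist(path, point2, point1, 1)
-- ===== SOURCE B (Python) =====
-- def path_dist(path, point1, point2, dir):
--     # Branchless arithmetical formulation: booleans act as 0/1 multipliers.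
--     # sign selects traversal direction; the wrap term len(path) is applied
--     # exactly when the signed gap is non-positive.
--     sign = 2 * (dir == 1) - 1
--     gap = (point2 - point1) * sign
--     return gap + len(path) * (gap <= 0)
-- ===== Notes on version B (the rewrite author's own statement) =====
-- stated objective: alternative
-- what changed: Replaces A's four-way branch chain with a self-recursive argument swap by a completely branchless arithmetic formulation: a 0/1 direction multiplier derived from (dir == 1) and a wrap term len(path)*(gap <= 0), so B contains no if statements and no recursion.
import Mathlib
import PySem

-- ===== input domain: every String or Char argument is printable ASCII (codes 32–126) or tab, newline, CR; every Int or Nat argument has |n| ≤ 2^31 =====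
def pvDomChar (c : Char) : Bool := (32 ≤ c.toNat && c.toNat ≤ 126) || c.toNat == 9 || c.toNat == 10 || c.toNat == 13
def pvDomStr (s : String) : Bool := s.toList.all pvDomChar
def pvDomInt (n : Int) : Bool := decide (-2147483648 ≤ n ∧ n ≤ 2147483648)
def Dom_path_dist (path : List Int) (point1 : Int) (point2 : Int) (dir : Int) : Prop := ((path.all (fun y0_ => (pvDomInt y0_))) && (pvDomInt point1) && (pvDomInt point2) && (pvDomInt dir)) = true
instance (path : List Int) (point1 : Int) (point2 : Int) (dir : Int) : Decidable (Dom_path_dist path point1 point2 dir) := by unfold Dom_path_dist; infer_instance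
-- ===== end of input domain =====

-- B replaces A's branch chain + recursive swap with a branchless arithmetic formulation (objective: alternative).


-- ===== PORT A =====
def path_dist (path : List Int) (point1 : Int) (point2 : Int) (dir : Int) : Int :=
  if dir == 1 && point2 > point1 then point2 - point1
  else if dir == 1 && point1 > point2 then (path.length : Int) - point1 + point2
  else if point2 == point1 then (path.length : Int)
  else path_dist path point2 point1 1
termination_by (dir - 1).natAbs
decreasing_by
  simp only [beq_iff_eq, Bool.and_eq_true, decide_eq_true_eq, not_and, not_lt] at *
  omega

-- ===== PORT B =====
-- Python booleans used as 0/1 integers are ported as 'if … then 1 else 0'.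
def path_dist_alt (path : List Int) (point1 : Int) (point2 : Int) (dir : Int) : Int :=
  let sign : Int := 2 * (if dir == 1 then 1 else 0) - 1
  let gap : Int := (point2 - point1) * sign
  gap + (path.length : Int) * (if gap ≤ 0 then 1 else 0)

-- ===== PRECONDITION & SPEC =====
def Spec_path_dist (path : List Int) (point1 : Int) (point2 : Int) (dir : Int) (out : Int) : Prop := out = path_dist_alt path point1 point2 dir
instance (path : List Int) (point1 : Int) (point2 : Int) (dir : Int) (out : Int) : Decidable (Spec_path_dist path point1 point2 dir out) := by unfold Spec_path_dist; infer_instance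

-- ===== CLAIM (what is proved, stated in full; the proofs are below) =====
def Claim_equal_path_dist : Prop := ∀ (path : List Int) (point1 : Int) (point2 : Int) (dir : Int), Dom_path_dist path point1 point2 dir → Spec_path_dist path point1 point2 dir (path_dist path point1 point2 dir)

-- ===== LEMMAS AND PROOFS =====

-- ===== VERDICT (by name: the statement is the Claim_ definition above) =====
theorem path_dist_spec : Claim_equal_path_dist := by
  intro path point1 point2 dir _
  unfold Spec_path_dist
  by_cases hd : dir = 1
  · rw [path_dist]
    simp only [path_dist_alt, hd, beq_iff_eq, Bool.and_eq_true, decide_eq_true_eq, true_and]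
    split_ifs <;> ring_nf <;> omega
  · rw [path_dist, path_dist]
    simp only [path_dist_alt, beq_iff_eq, Bool.and_eq_true, decide_eq_true_eq, true_and]
    split_ifs <;> ring_nf <;> omega
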